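-- pv_equiv track=rewrite | github.com/DigiKlausur/e2xgrader | e2xgrader/exchange/utils.py | create_hashcode_table
-- ===== SOURCE A (Python) =====
-- from textwrap import dedent
--
-- def create_hashcode_table(hashcode: str) -> str:
--     """
--     Creates an HTML table representation of a hashcode.
--
--     Args:
--         hashcode (str): The hashcode to be represented.
--
--     Returns:
--         str: The HTML table representation of the hashcode.
--     """
--
--     def td(char):
--         return dedent(
--             f"""
--             <td
--              style='border: 1px solid #999;min-width:1.8em;text-align:center;'
--             >{char}</td>
--             """
--         ).replace("\n", " ")
--
--     dash = "<td style='font-weight: bold;color: #999;background: #dff0d8;'>-</td>"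
--
--     cells = dash.join(
--         ["".join([td(char) for char in chars]) for chars in hashcode.split("-")]
--     )
--     return f"<table><tr style='font-size:1.5em;'>{cells}</tr></table>"
-- ===== SOURCE B (Python) =====
-- from textwrap import dedent
--
--
-- def create_hashcode_table(hashcode: str) -> str:
--     """
--     Creates an HTML table representation of a hashcode.
--
--     Single pass over the characters: no split('-') / separator-join.
--     """
--
--     def td(char):
--         return dedent(
--             f"""
--             <td
--              style='border: 1px solid #999;min-width:1.8em;text-align:center;'
--             >{char}</td>
--             """
--         ).replace("\n", " ")
--
--     dash = "<td style='font-weight: bold;color: #999;background: #dff0d8;'>-</td>"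
--
--     cells = "".join(dash if ch == "-" else td(ch) for ch in hashcode)
--     return f"<table><tr style='font-size:1.5em;'>{cells}</tr></table>"
-- ===== Notes on version B (the rewrite author's own statement) =====
-- stated objective: simpler
-- what changed: B replaces split('-') plus a nested per-group comprehension joined with the dash cell by one pass over the characters of hashcode, emitting the dash cell for '-' and td(char) otherwise, joined once.
import Mathlib
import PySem

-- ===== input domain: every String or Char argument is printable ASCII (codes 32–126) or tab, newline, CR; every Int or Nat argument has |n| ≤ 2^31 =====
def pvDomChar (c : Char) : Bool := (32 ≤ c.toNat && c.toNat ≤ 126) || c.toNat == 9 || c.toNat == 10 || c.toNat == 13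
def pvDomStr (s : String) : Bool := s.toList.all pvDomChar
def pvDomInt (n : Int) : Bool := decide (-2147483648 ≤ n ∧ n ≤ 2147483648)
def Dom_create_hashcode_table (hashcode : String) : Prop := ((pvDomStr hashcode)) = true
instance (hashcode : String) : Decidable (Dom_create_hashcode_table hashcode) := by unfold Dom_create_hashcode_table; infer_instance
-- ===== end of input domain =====

-- B removes split('-') + dash-join in favour of one pass per character; objective: simpler.

-- ===== PORT A =====
-- td(char): the dedent is the identity here (the line '<td' of the template carries no
-- indentation, so textwrap.dedent strips nothing); the .replace('\n', ' ') is ported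
-- exactly with PySem.Chars.replace. Shared verbatim by both Pythons, hence one helper.
def tdCell (c : Char) : List Char :=
  -- textwrap.dedent ported by hand for this one fixed template (the only varying line is
  -- "            >{c}</td>"): for a single non-'\n' char that line keeps the 12-space
  -- indent, the common margin is the 12-space indent, and whitespace-only lines are
  -- normalized to ''; for c = '\n' the template gains the unindented line "</td>", so the
  -- common margin is empty and only the whitespace-only lines are normalized to ''.
  -- Exact for every single char (checked against CPython's textwrap.dedent).
  let dedented :=
    if c = '\n' then
      ("\n            <td\n             style='border: 1px solid #999;min-width:1.8em;text-align:center;'\n            >\n</td>\n").toList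
    else
      "\n<td\n style='border: 1px solid #999;min-width:1.8em;text-align:center;'\n>".toList
        ++ [c] ++ "</td>\n".toList
  PySem.Chars.replace dedented ['\n'] [' ']

-- the `dash` string literal, shared verbatim by both Pythons
def dashCell : List Char :=
  "<td style='font-weight: bold;color: #999;background: #dff0d8;'>-</td>".toList

def create_hashcode_table (hashcode : String) : String :=
  let cells := PySem.Chars.join dashCell
    ((PySem.Chars.splitOn hashcode.toList ['-']).map
      (fun chars => PySem.Chars.join [] (chars.map tdCell)))
  String.ofList ("<table><tr style='font-size:1.5em;'>".toList ++ cells ++ "</tr></table>".toList)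

-- ===== PORT B =====
def create_hashcode_table_alt (hashcode : String) : String :=
  let cells := PySem.Chars.join []
    (hashcode.toList.map (fun c => if c = '-' then dashCell else tdCell c))
  String.ofList ("<table><tr style='font-size:1.5em;'>".toList ++ cells ++ "</tr></table>".toList)

-- ===== PRECONDITION & SPEC =====
def Spec_create_hashcode_table (hashcode : String) (out : String) : Prop := out = create_hashcode_table_alt hashcode
instance (hashcode : String) (out : String) : Decidable (Spec_create_hashcode_table hashcode out) := by unfold Spec_create_hashcode_table; infer_instance

-- ===== CLAIM (what is proved, stated in full; the proofs are below) =====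
def Claim_equal_create_hashcode_table : Prop := ∀ (hashcode : String), Dom_create_hashcode_table hashcode → Spec_create_hashcode_table hashcode (create_hashcode_table hashcode)

-- ===== LEMMAS AND PROOFS =====

-- proof-side characterisation of Python's s.split('-')
def fsplit : List Char → List Char → List (List Char)
  | [], cur => [cur.reverse]
  | c :: rest, cur => if c = '-' then cur.reverse :: fsplit rest [] else fsplit rest (c :: cur)

lemma fsplit_ne_nil (l cur : List Char) : fsplit l cur ≠ [] := by
  induction l generalizing cur with
  | nil => simp [fsplit]
  | cons c rest ih => by_cases h : c = '-' <;> simp [fsplit, h, ih]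

lemma intercalate_cons_cons (sep a b : List Char) (l : List (List Char)) :
    List.intercalate sep (a :: b :: l) = a ++ sep ++ List.intercalate sep (b :: l) := by
  simp [List.intercalate, List.intersperse]

lemma splitOn_go_eq (l : List Char) : ∀ (cur : List Char) (acc : List (List Char)) (fuel : Nat),
    l.length < fuel →
    PySem.Chars.splitOn.go ['-'] fuel l cur acc = acc.reverse ++ fsplit l cur := by
  induction l with
  | nil =>
    intro cur acc fuel hf
    cases fuel with
    | zero => omega
    | succ n =>
      have h0 : PySem.Chars.splitOn.go ['-'] (n+1) [] cur acc = (cur.reverse :: acc).reverse := rfl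
      simp [h0, fsplit]
  | cons c rest ih =>
    intro cur acc fuel hf
    cases fuel with
    | zero => omega
    | succ n =>
      have h0 : PySem.Chars.splitOn.go ['-'] (n+1) (c::rest) cur acc =
          if ['-'].isPrefixOf (c::rest) then
            PySem.Chars.splitOn.go ['-'] n rest [] (cur.reverse :: acc)
          else PySem.Chars.splitOn.go ['-'] n rest (c::cur) acc := rfl
      rw [h0]
      by_cases h : c = '-'
      · subst h
        have hp : (['-'].isPrefixOf ('-'::rest)) = true := by simp [List.isPrefixOf]
        rw [if_pos hp]
        rw [ih [] (cur.reverse :: acc) n (by simp at hf ⊢; omega)]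
        simp [fsplit]
      · have hp : (['-'].isPrefixOf (c::rest)) = false := by
          simp [List.isPrefixOf]; exact fun hc => absurd hc.symm h
        rw [if_neg (by simp [hp])]
        rw [ih (c :: cur) acc n (by simp at hf ⊢; omega)]
        simp [fsplit, h]

lemma splitOn_eq_fsplit (s : List Char) :
    PySem.Chars.splitOn s ['-'] = fsplit s [] := by
  simpa using splitOn_go_eq s [] [] (s.length + 1) (Nat.lt_succ_self _)

lemma intersperse_nil_flatten (l : List (List Char)) :
    (List.intersperse ([] : List Char) l).flatten = l.flatten := by
  induction l with
  | nil => simp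
  | cons a t ih =>
    cases t with
    | nil => simp
    | cons b t' =>
      rw [List.intersperse_cons₂]
      simp only [List.flatten_cons] at ih ⊢
      simp [ih]

lemma intercalate_nil_flatten (l : List (List Char)) :
    List.intercalate ([] : List Char) l = l.flatten := by
  simp [List.intercalate, intersperse_nil_flatten]

lemma main_cells (s : List Char) : ∀ (cur : List Char),
    List.intercalate dashCell
      ((fsplit s cur).map (fun cs => List.intercalate [] (cs.map tdCell)))
    = (cur.reverse.map tdCell).flatten
      ++ (s.map (fun c => if c = '-' then dashCell else tdCell c)).flatten := by
  induction s with
  | nil =>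
    intro cur
    rw [show fsplit [] cur = [cur.reverse] from rfl]
    simp [List.intercalate, intersperse_nil_flatten]
  | cons c rest ih =>
    intro cur
    by_cases h : c = '-'
    · subst h
      obtain ⟨b, t', hbt⟩ : ∃ b t', fsplit rest [] = b :: t' := by
        cases hfe : fsplit rest [] with
        | nil => exact absurd hfe (fsplit_ne_nil rest [])
        | cons b t' => exact ⟨b, t', rfl⟩
      rw [show fsplit ('-'::rest) cur = cur.reverse :: (b :: t') from by
            rw [← hbt]; simp [fsplit]]
      have key := ih []
      rw [hbt, List.map_cons] at key
      rw [List.map_cons, List.map_cons, intercalate_cons_cons, key]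
      simp [intercalate_nil_flatten, List.append_assoc]
    · rw [show fsplit (c::rest) cur = fsplit rest (c :: cur) from by simp [fsplit, h]]
      rw [ih (c :: cur)]
      simp [h, List.append_assoc]

-- ===== VERDICT (by name: the statement is the Claim_ definition above) =====
theorem create_hashcode_table_spec : Claim_equal_create_hashcode_table := by
  intro hashcode _
  unfold Spec_create_hashcode_table create_hashcode_table create_hashcode_table_alt
  simp only [PySem.Chars.join, splitOn_eq_fsplit]
  rw [main_cells hashcode.toList [], intercalate_nil_flatten]
  simp
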